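-- pv_equiv track=rewrite | github.com/fallensp/server-monitoring | src/services/inventory.py | get_inventory_summary
-- ===== SOURCE A (Python) =====
-- def get_inventory_summary(
--     ec2_instances: list[dict],
--     rds_instances: list[dict],
-- ) -> dict:
--     """Generate inventory summary statistics.
--
--     Args:
--         ec2_instances: List of EC2 instances
--         rds_instances: List of RDS instances
--
--     Returns:
--         Dict with summary statistics
--     """
--     ec2_running = sum(1 for i in ec2_instances if i.get("state") == "running")
--     ec2_stopped = sum(1 for i in ec2_instances if i.get("state") == "stopped")
--
--     rds_available = sum(1 for i in rds_instances if i.get("status") == "available")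
--
--     regions_with_ec2 = len(set(i.get("region") for i in ec2_instances))
--     regions_with_rds = len(set(i.get("region") for i in rds_instances))
--
--     return {
--         "ec2_total": len(ec2_instances),
--         "ec2_running": ec2_running,
--         "ec2_stopped": ec2_stopped,
--         "rds_total": len(rds_instances),
--         "rds_available": rds_available,
--         "regions_with_ec2": regions_with_ec2,
--         "regions_with_rds": regions_with_rds,
--     }
-- ===== SOURCE B (Python) =====
-- def get_inventory_summary(
--     ec2_instances: list[dict],
--     rds_instances: list[dict],
-- ) -> dict:
--     """Group instances by region, then derive every statistic from the per-region tables."""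
--     ec2_by_region = {}
--     for i in ec2_instances:
--         r = i.get("region")
--         t, run, stop = ec2_by_region.get(r, (0, 0, 0))
--         s = i.get("state")
--         ec2_by_region[r] = (
--             t + 1,
--             run + (1 if s == "running" else 0),
--             stop + (1 if s == "stopped" else 0),
--         )
--
--     rds_by_region = {}
--     for i in rds_instances:
--         r = i.get("region")
--         t, av = rds_by_region.get(r, (0, 0))
--         rds_by_region[r] = (t + 1, av + (1 if i.get("status") == "available" else 0))
--
--     return {
--         "ec2_total": sum(g[0] for g in ec2_by_region.values()),
--         "ec2_running": sum(g[1] for g in ec2_by_region.values()),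
--         "ec2_stopped": sum(g[2] for g in ec2_by_region.values()),
--         "rds_total": sum(g[0] for g in rds_by_region.values()),
--         "rds_available": sum(g[1] for g in rds_by_region.values()),
--         "regions_with_ec2": len(ec2_by_region),
--         "regions_with_rds": len(rds_by_region),
--     }
-- ===== Notes on version B (the rewrite author's own statement) =====
-- stated objective: alternative
-- what changed: Instead of A's independent state counters and region sets, B builds one per-region aggregation table (region -> (total, running, stopped) / (total, available)) per list and reads every statistic off the table: totals by summing the table's columns, distinct-region counts as the table's size.
import Mathlib
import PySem

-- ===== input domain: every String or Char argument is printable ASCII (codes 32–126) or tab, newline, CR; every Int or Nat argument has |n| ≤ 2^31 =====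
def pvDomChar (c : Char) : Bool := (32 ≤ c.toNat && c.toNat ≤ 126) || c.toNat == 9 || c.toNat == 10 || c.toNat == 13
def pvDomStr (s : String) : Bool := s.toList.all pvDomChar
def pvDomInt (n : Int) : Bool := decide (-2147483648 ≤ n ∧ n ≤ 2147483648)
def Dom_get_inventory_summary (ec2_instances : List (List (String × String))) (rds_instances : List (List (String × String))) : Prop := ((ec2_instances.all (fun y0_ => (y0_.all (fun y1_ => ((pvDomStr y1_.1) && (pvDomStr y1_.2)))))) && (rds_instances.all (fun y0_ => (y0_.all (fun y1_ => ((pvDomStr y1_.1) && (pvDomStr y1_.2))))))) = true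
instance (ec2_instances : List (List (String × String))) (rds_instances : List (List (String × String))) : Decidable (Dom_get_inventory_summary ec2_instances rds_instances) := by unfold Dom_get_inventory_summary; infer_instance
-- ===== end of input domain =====

-- B replaces A's five independent scans (state counters + region sets) by one per-region
-- aggregation table per list; every statistic is then read off the table. Alternative
-- decomposition, same O(n) cost.

-- ===== PORT A =====
-- dict.get(k) on an input dict = first-match association-list lookup
def get_inventory_summary (ec2_instances : List (List (String × String))) (rds_instances : List (List (String × String))) : List (String × Int) :=
  let ec2_running : Int := ec2_instances.foldl (fun acc i => if i.lookup "state" == some "running" then acc + 1 else acc) 0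
  let ec2_stopped : Int := ec2_instances.foldl (fun acc i => if i.lookup "state" == some "stopped" then acc + 1 else acc) 0
  let rds_available : Int := rds_instances.foldl (fun acc i => if i.lookup "status" == some "available" then acc + 1 else acc) 0
  let regions_with_ec2 : Int := PySem.Set.len (PySem.Set.ofList (ec2_instances.map (fun i => i.lookup "region")))
  let regions_with_rds : Int := PySem.Set.len (PySem.Set.ofList (rds_instances.map (fun i => i.lookup "region")))
  [("ec2_total", (ec2_instances.length : Int)),
   ("ec2_running", ec2_running),
   ("ec2_stopped", ec2_stopped),
   ("rds_total", (rds_instances.length : Int)),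
   ("rds_available", rds_available),
   ("regions_with_ec2", regions_with_ec2),
   ("regions_with_rds", regions_with_rds)]

-- ===== PORT B =====
-- one grouping step: fetch the region's (total, running, stopped) row and write back the bumped row
def pvEc2Step (d : PySem.Dict (Option String) (Int × Int × Int)) (i : List (String × String)) : PySem.Dict (Option String) (Int × Int × Int) :=
  let g := d.getD (i.lookup "region") (0, 0, 0)
  let s := i.lookup "state"
  d.insert (i.lookup "region")
    (g.1 + 1, g.2.1 + (if s == some "running" then 1 else 0), g.2.2 + (if s == some "stopped" then 1 else 0))

-- one grouping step: the region's (total, available) row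
def pvRdsStep (d : PySem.Dict (Option String) (Int × Int)) (i : List (String × String)) : PySem.Dict (Option String) (Int × Int) :=
  let g := d.getD (i.lookup "region") (0, 0)
  d.insert (i.lookup "region") (g.1 + 1, g.2 + (if i.lookup "status" == some "available" then 1 else 0))

def get_inventory_summary_alt (ec2_instances : List (List (String × String))) (rds_instances : List (List (String × String))) : List (String × Int) :=
  let de := ec2_instances.foldl pvEc2Step PySem.Dict.empty
  let dr := rds_instances.foldl pvRdsStep PySem.Dict.empty
  [("ec2_total", (de.values.map (·.1)).sum),
   ("ec2_running", (de.values.map (·.2.1)).sum),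
   ("ec2_stopped", (de.values.map (·.2.2)).sum),
   ("rds_total", (dr.values.map (·.1)).sum),
   ("rds_available", (dr.values.map (·.2)).sum),
   ("regions_with_ec2", (de.size : Int)),
   ("regions_with_rds", (dr.size : Int))]

-- ===== PRECONDITION & SPEC =====
def Spec_get_inventory_summary (ec2_instances : List (List (String × String))) (rds_instances : List (List (String × String))) (out : List (String × Int)) : Prop := out = get_inventory_summary_alt ec2_instances rds_instances
instance (ec2_instances : List (List (String × String))) (rds_instances : List (List (String × String))) (out : List (String × Int)) : Decidable (Spec_get_inventory_summary ec2_instances rds_instances out) := by unfold Spec_get_inventory_summary; infer_instance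

-- ===== CLAIM (what is proved, stated in full; the proofs are below) =====
def Claim_equal_get_inventory_summary : Prop := ∀ (ec2_instances : List (List (String × String))) (rds_instances : List (List (String × String))), Dom_get_inventory_summary ec2_instances rds_instances → Spec_get_inventory_summary ec2_instances rds_instances (get_inventory_summary ec2_instances rds_instances)

-- ===== LEMMAS AND PROOFS =====

-- a countP splits across a filter and its complement
theorem pv_countP_split {α : Type} (P q : α → Bool) (l : List α) :
    l.countP P = (l.filter q).countP P + (l.filter (fun a => !q a)).countP P := by
  induction l with
  | nil => rfl
  | cons x l ih =>
    by_cases h : q x <;> by_cases hp : P x <;>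
      simp [List.filter_cons, List.countP_cons, h, hp, ih] <;> omega

-- distinct fibers partition a count: summing a per-fiber count over all (distinct) keys gives the global count
theorem pv_sum_fiber {α β : Type} [BEq β] [LawfulBEq β] (key : α → β) (P : α → Bool) :
    ∀ (rs : List β) (l : List α), rs.Nodup → (∀ i ∈ l, key i ∈ rs) →
    (rs.map (fun r => ((l.filter (fun i => key i == r)).countP P : Int))).sum = (l.countP P : Int) := by
  intro rs
  induction rs with
  | nil =>
    intro l _ hcov
    have : l = [] := List.eq_nil_iff_forall_not_mem.2 (fun i hi => by simpa using hcov i hi)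
    simp [this]
  | cons r rs ih =>
    intro l hnd hcov
    have hr : r ∉ rs := (List.nodup_cons.1 hnd).1
    have hnd' : rs.Nodup := (List.nodup_cons.1 hnd).2
    set l' := l.filter (fun i => !(key i == r)) with hl'
    have hmapeq : ∀ r' ∈ rs,
        (l.filter (fun i => key i == r')).countP P = (l'.filter (fun i => key i == r')).countP P := by
      intro r' hr'
      have hne : r' ≠ r := fun h => hr (h ▸ hr')
      rw [hl', List.filter_filter]
      congr 1
      apply List.filter_congr
      intro i _
      by_cases h : key i == r'
      · have : ¬ (key i == r) = true := by
          simp only [beq_iff_eq] at h ⊢; rw [h]; exact fun hh => hne hh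
        simp [h, this]
      · simp [h]
    have hcov' : ∀ i ∈ l', key i ∈ rs := by
      intro i hi
      have h1 := List.mem_filter.1 hi
      have h2 := hcov i h1.1
      rcases List.mem_cons.1 h2 with h | h
      · exfalso; simp [h] at h1
      · exact h
    have := ih l' hnd' hcov'
    rw [List.map_cons, List.sum_cons]
    rw [List.map_congr_left (fun r' hr' => by rw [hmapeq r' hr'])]
    rw [this]
    rw [pv_countP_split P (fun i => key i == r) l]
    push_cast
    ring

-- the EC2 grouping fold, read at one region, accumulates that region's three counts
theorem pv_ec2_getD (l : List (List (String × String))) :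
    ∀ (d : PySem.Dict (Option String) (Int × Int × Int)) (r : Option String),
    (l.foldl pvEc2Step d).getD r (0, 0, 0) =
      ((d.getD r (0, 0, 0)).1 + ((l.filter (fun i => i.lookup "region" == r)).length : Int),
       (d.getD r (0, 0, 0)).2.1 + (((l.filter (fun i => i.lookup "region" == r)).countP (fun i => i.lookup "state" == some "running")) : Int),
       (d.getD r (0, 0, 0)).2.2 + (((l.filter (fun i => i.lookup "region" == r)).countP (fun i => i.lookup "state" == some "stopped")) : Int)) := by
  induction l with
  | nil => intro d r; simp
  | cons i l ih =>
    intro d r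
    rw [List.foldl_cons, ih]
    have hstep : (pvEc2Step d i).getD r (0, 0, 0) =
        if r = i.lookup "region" then
          ((d.getD r (0, 0, 0)).1 + 1,
           (d.getD r (0, 0, 0)).2.1 + (if i.lookup "state" == some "running" then 1 else 0),
           (d.getD r (0, 0, 0)).2.2 + (if i.lookup "state" == some "stopped" then 1 else 0))
        else d.getD r (0, 0, 0) := by
      simp only [pvEc2Step, PySem.Dict.getD_insert]
      by_cases hr : r = List.lookup "region" i
      · simp [hr]
      · simp [hr]
    rw [hstep]
    by_cases hr : r = i.lookup "region"
    · have hb : (List.lookup "region" i == r) = true := by simp [hr]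
      simp only [if_pos hr, List.filter_cons, hb, if_pos rfl, List.length_cons,
        List.countP_cons, Prod.mk.injEq]
      refine ⟨by push_cast [List.length_cons]; ring, ?_, ?_⟩ <;>
        by_cases h1 : (List.lookup "state" i == some "running") <;>
          by_cases h2 : (List.lookup "state" i == some "stopped") <;>
            simp [h1, h2] <;> push_cast <;> ring
    · have hb : (List.lookup "region" i == r) = false := by
        simp only [beq_eq_false_iff_ne]; exact fun hh => hr hh.symm
      simp only [if_neg hr, List.filter_cons, hb, Bool.false_eq_true, if_false]

-- the RDS grouping fold, read at one region, accumulates that region's two counts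
theorem pv_rds_getD (l : List (List (String × String))) :
    ∀ (d : PySem.Dict (Option String) (Int × Int)) (r : Option String),
    (l.foldl pvRdsStep d).getD r (0, 0) =
      ((d.getD r (0, 0)).1 + ((l.filter (fun i => i.lookup "region" == r)).length : Int),
       (d.getD r (0, 0)).2 + (((l.filter (fun i => i.lookup "region" == r)).countP (fun i => i.lookup "status" == some "available")) : Int)) := by
  induction l with
  | nil => intro d r; simp
  | cons i l ih =>
    intro d r
    rw [List.foldl_cons, ih]
    have hstep : (pvRdsStep d i).getD r (0, 0) =
        if r = i.lookup "region" then
          ((d.getD r (0, 0)).1 + 1,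
           (d.getD r (0, 0)).2 + (if i.lookup "status" == some "available" then 1 else 0))
        else d.getD r (0, 0) := by
      simp only [pvRdsStep, PySem.Dict.getD_insert]
      by_cases hr : r = List.lookup "region" i
      · simp [hr]
      · simp [hr]
    rw [hstep]
    by_cases hr : r = i.lookup "region"
    · have hb : (List.lookup "region" i == r) = true := by simp [hr]
      simp only [if_pos hr, List.filter_cons, hb, if_pos rfl, List.length_cons,
        List.countP_cons, Prod.mk.injEq]
      refine ⟨by push_cast [List.length_cons]; ring, ?_⟩
      by_cases h1 : (List.lookup "status" i == some "available") <;>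
        simp [h1] <;> push_cast <;> ring
    · have hb : (List.lookup "region" i == r) = false := by
        simp only [beq_eq_false_iff_ne]; exact fun hh => hr hh.symm
      simp only [if_neg hr, List.filter_cons, hb, Bool.false_eq_true, if_false]

-- the EC2 grouping fold's function, written in the insert-at-key shape the Dict key lemmas expect
theorem pv_ec2_fun_eq :
    pvEc2Step = fun (d : PySem.Dict (Option String) (Int × Int × Int)) i =>
      d.insert (i.lookup "region")
        ((d.getD (i.lookup "region") (0, 0, 0)).1 + 1,
         (d.getD (i.lookup "region") (0, 0, 0)).2.1 + (if i.lookup "state" == some "running" then 1 else 0),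
         (d.getD (i.lookup "region") (0, 0, 0)).2.2 + (if i.lookup "state" == some "stopped" then 1 else 0)) := rfl

theorem pv_rds_fun_eq :
    pvRdsStep = fun (d : PySem.Dict (Option String) (Int × Int)) i =>
      d.insert (i.lookup "region")
        ((d.getD (i.lookup "region") (0, 0)).1 + 1,
         (d.getD (i.lookup "region") (0, 0)).2 + (if i.lookup "status" == some "available" then 1 else 0)) := rfl

theorem pv_ec2_keys (e : List (List (String × String))) :
    (e.foldl pvEc2Step PySem.Dict.empty).keys = PySem.Set.ofList (e.map (fun i => i.lookup "region")) := by
  rw [pv_ec2_fun_eq, PySem.Dict.keys_foldl_insert_key, PySem.Dict.keys_empty,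
    PySem.Set.update_nil_left]

theorem pv_ec2_nodup (e : List (List (String × String))) :
    (e.foldl pvEc2Step PySem.Dict.empty).keys.Nodup := by
  rw [pv_ec2_fun_eq]
  exact PySem.Dict.nodup_keys_foldl_insert_key _ _ _ _ (by simp)

theorem pv_rds_keys (r : List (List (String × String))) :
    (r.foldl pvRdsStep PySem.Dict.empty).keys = PySem.Set.ofList (r.map (fun i => i.lookup "region")) := by
  rw [pv_rds_fun_eq, PySem.Dict.keys_foldl_insert_key, PySem.Dict.keys_empty,
    PySem.Set.update_nil_left]

theorem pv_rds_nodup (r : List (List (String × String))) :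
    (r.foldl pvRdsStep PySem.Dict.empty).keys.Nodup := by
  rw [pv_rds_fun_eq]
  exact PySem.Dict.nodup_keys_foldl_insert_key _ _ _ _ (by simp)

-- every instance's region is a key of its grouping table
theorem pv_ec2_cover (e : List (List (String × String))) :
    ∀ i ∈ e, i.lookup "region" ∈ (e.foldl pvEc2Step PySem.Dict.empty).keys := by
  intro i hi
  rw [pv_ec2_keys, PySem.Set.mem_ofList]
  exact List.mem_map_of_mem hi

theorem pv_rds_cover (r : List (List (String × String))) :
    ∀ i ∈ r, i.lookup "region" ∈ (r.foldl pvRdsStep PySem.Dict.empty).keys := by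
  intro i hi
  rw [pv_rds_keys, PySem.Set.mem_ofList]
  exact List.mem_map_of_mem hi

-- a column sum over the EC2 table is a fiber sum over the distinct regions, hence a global count
theorem pv_ec2_sum (e : List (List (String × String))) (P : List (String × String) → Bool)
    (f : Int × Int × Int → Int)
    (hf : ∀ k, f ((e.foldl pvEc2Step PySem.Dict.empty).getD k (0, 0, 0)) =
      (((e.filter (fun i => i.lookup "region" == k)).countP P : Int))) :
    (((e.foldl pvEc2Step PySem.Dict.empty).values.map f).sum) = (e.countP P : Int) := by
  rw [PySem.Dict.values_eq_map_keys _ (pv_ec2_nodup e) (0, 0, 0), List.map_map]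
  have h1 : ((e.foldl pvEc2Step PySem.Dict.empty).keys.map
      (f ∘ fun k => (e.foldl pvEc2Step PySem.Dict.empty).getD k (0, 0, 0))) =
      ((e.foldl pvEc2Step PySem.Dict.empty).keys.map
        (fun k => (((e.filter (fun i => i.lookup "region" == k)).countP P : Int)))) :=
    List.map_congr_left (fun k _ => hf k)
  rw [h1]
  exact pv_sum_fiber (fun i => i.lookup "region") P _ e (pv_ec2_nodup e) (pv_ec2_cover e)

theorem pv_rds_sum (r : List (List (String × String))) (P : List (String × String) → Bool)
    (f : Int × Int → Int)
    (hf : ∀ k, f ((r.foldl pvRdsStep PySem.Dict.empty).getD k (0, 0)) =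
      (((r.filter (fun i => i.lookup "region" == k)).countP P : Int))) :
    (((r.foldl pvRdsStep PySem.Dict.empty).values.map f).sum) = (r.countP P : Int) := by
  rw [PySem.Dict.values_eq_map_keys _ (pv_rds_nodup r) (0, 0), List.map_map]
  have h1 : ((r.foldl pvRdsStep PySem.Dict.empty).keys.map
      (f ∘ fun k => (r.foldl pvRdsStep PySem.Dict.empty).getD k (0, 0))) =
      ((r.foldl pvRdsStep PySem.Dict.empty).keys.map
        (fun k => (((r.filter (fun i => i.lookup "region" == k)).countP P : Int)))) :=
    List.map_congr_left (fun k _ => hf k)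
  rw [h1]
  exact pv_sum_fiber (fun i => i.lookup "region") P _ r (pv_rds_nodup r) (pv_rds_cover r)

-- ===== VERDICT (by name: the statement is the Claim_ definition above) =====
theorem get_inventory_summary_spec : Claim_equal_get_inventory_summary := by
  intro e r _
  show _ = _
  simp only [get_inventory_summary, get_inventory_summary_alt]
  have he_tot : (((e.foldl pvEc2Step PySem.Dict.empty).values.map (·.1)).sum) = (e.length : Int) := by
    rw [show (e.length : Int) = (e.countP (fun _ => true) : Int) by rw [List.countP_true]]
    exact pv_ec2_sum e (fun _ => true) _ (fun k => by
      rw [pv_ec2_getD, PySem.Dict.getD_empty, List.countP_true]; push_cast; ring)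
  have he_run : (((e.foldl pvEc2Step PySem.Dict.empty).values.map (·.2.1)).sum) =
      (e.countP (fun i => i.lookup "state" == some "running") : Int) :=
    pv_ec2_sum e _ _ (fun k => by rw [pv_ec2_getD, PySem.Dict.getD_empty]; push_cast; ring)
  have he_stop : (((e.foldl pvEc2Step PySem.Dict.empty).values.map (·.2.2)).sum) =
      (e.countP (fun i => i.lookup "state" == some "stopped") : Int) :=
    pv_ec2_sum e _ _ (fun k => by rw [pv_ec2_getD, PySem.Dict.getD_empty]; push_cast; ring)
  have hr_tot : (((r.foldl pvRdsStep PySem.Dict.empty).values.map (·.1)).sum) = (r.length : Int) := by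
    rw [show (r.length : Int) = (r.countP (fun _ => true) : Int) by rw [List.countP_true]]
    exact pv_rds_sum r (fun _ => true) _ (fun k => by
      rw [pv_rds_getD, PySem.Dict.getD_empty, List.countP_true]; push_cast; ring)
  have hr_av : (((r.foldl pvRdsStep PySem.Dict.empty).values.map (·.2)).sum) =
      (r.countP (fun i => i.lookup "status" == some "available") : Int) :=
    pv_rds_sum r _ _ (fun k => by rw [pv_rds_getD, PySem.Dict.getD_empty]; push_cast; ring)
  have he_size : ((e.foldl pvEc2Step PySem.Dict.empty).size : Int) =
      PySem.Set.len (PySem.Set.ofList (e.map (fun i => i.lookup "region"))) := by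
    rw [← pv_ec2_keys e]
    simp [PySem.Set.len, PySem.Dict.size, PySem.Dict.keys]
  have hr_size : ((r.foldl pvRdsStep PySem.Dict.empty).size : Int) =
      PySem.Set.len (PySem.Set.ofList (r.map (fun i => i.lookup "region"))) := by
    rw [← pv_rds_keys r]
    simp [PySem.Set.len, PySem.Dict.size, PySem.Dict.keys]
  rw [PySem.List.foldl_count_if, PySem.List.foldl_count_if, PySem.List.foldl_count_if]
  rw [he_tot, he_run, he_stop, hr_tot, hr_av, he_size, hr_size]
  simp
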